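-- pv_equiv track=rewrite | github.com/mattpacey/Pacman_core | tools/htd_hpl/bin/htd_hpl_xdp_interface.py | get_indices_list_str
-- ===== SOURCE A (Python) =====
-- from itertools import count, groupby
--
-- def get_indices_list_str(data_hash):
--     final_data_l = []
--     for l in sorted(data_hash):
--         if (data_hash[l]):
--             final_data_l.append(l)
--
--     group_list = (list(x) for _, x in groupby(final_data_l, lambda x, c=count(): next(c) - x))
--     final_data_str = ",".join("-".join(map(str, (g[0], g[-1])[:len(g)])) for g in group_list)
--     return final_data_str
-- ===== SOURCE B (Python) =====
-- def get_indices_list_str(data_hash):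
--     # boundary detection via set membership: a key k starts a run iff k-1 is not
--     # truthy and ends a run iff k+1 is not truthy; since runs are disjoint
--     # intervals, the i-th smallest start pairs with the i-th smallest end.
--     s = {k for k in data_hash if data_hash[k]}
--     starts = sorted(k for k in s if k - 1 not in s)
--     ends = sorted(k for k in s if k + 1 not in s)
--     return ",".join(str(a) if a == b else "{}-{}".format(a, b)
--                     for a, b in zip(starts, ends))
-- ===== Notes on version B (the rewrite author's own statement) =====
-- stated objective: alternative
-- what changed: Replaces A's sequential groupby scan over the sorted key list with boundary detection on a set: run starts (k-1 not truthy) and run ends (k+1 not truthy) are computed independently by set membership, sorted, and zipped into pairs.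
import Mathlib
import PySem

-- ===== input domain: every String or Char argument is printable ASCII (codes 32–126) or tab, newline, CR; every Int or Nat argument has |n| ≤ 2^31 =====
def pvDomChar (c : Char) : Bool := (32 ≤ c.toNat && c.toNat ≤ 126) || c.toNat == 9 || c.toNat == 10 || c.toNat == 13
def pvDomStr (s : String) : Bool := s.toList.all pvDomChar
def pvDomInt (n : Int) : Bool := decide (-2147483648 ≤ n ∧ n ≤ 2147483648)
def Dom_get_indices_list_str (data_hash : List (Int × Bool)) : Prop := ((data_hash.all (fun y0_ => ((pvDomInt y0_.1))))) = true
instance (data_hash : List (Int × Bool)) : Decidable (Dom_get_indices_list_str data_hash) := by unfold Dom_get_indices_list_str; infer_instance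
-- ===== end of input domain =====

-- B replaces A's sequential groupby scan with boundary detection on the truthy-key set:
-- run starts (k-1 not truthy) and run ends (k+1 not truthy) are found independently by
-- set membership, sorted, and zipped into pairs (alternative algorithm, same cost).

-- ===== PORT A =====
-- "-".join(map(str, (g[0], g[-1])[:len(g)]))  — on Chars; str(n) = PySem.Int.toChars (exact)
def pvFmtA (g : List Int) : List Char :=
  PySem.Chars.join ['-']
    ((PySem.List.slice [PySem.List.pyGetD g 0 0, PySem.List.pyGetD g (-1) 0] none
        (some (g.length : Int))).map PySem.Int.toChars)

-- groupby(final, lambda x, c=count(): next(c) - x): the key of consecutive elements is equal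
-- iff x - prev = 1; `cur` is the group being built, a new group opens when the key changes.
def pvGroupsGo (prev : Int) (cur : List Int) : List Int → List (List Int)
  | [] => [cur]
  | x :: xs =>
      if x - prev = 1 then pvGroupsGo x (cur ++ [x]) xs
      else cur :: pvGroupsGo x [x] xs

def get_indices_list_str (data_hash : List (Int × Bool)) : String :=
  let d := PySem.Dict.ofList data_hash
  -- for l in sorted(data_hash): if data_hash[l]: final_data_l.append(l)
  -- (data_hash[l]: l is always a key of d, so getD is exact here)
  let final := (PySem.List.sorted d.keys (fun x => x) false).foldl
      (fun acc l => if d.getD l false then acc ++ [l] else acc) []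
  let groups := match final with
    | [] => ([] : List (List Int))
    | x :: xs => pvGroupsGo x [x] xs
  String.ofList (PySem.Chars.join [','] (groups.map pvFmtA))

-- ===== PORT B =====
-- str(a) if a == b else "{}-{}".format(a, b)
def pvFmtB (a b : Int) : List Char :=
  if a = b then PySem.Int.toChars a
  else PySem.Int.toChars a ++ ['-'] ++ PySem.Int.toChars b

def get_indices_list_str_alt (data_hash : List (Int × Bool)) : String :=
  let d := PySem.Dict.ofList data_hash
  -- s = {k for k in data_hash if data_hash[k]}
  let s := PySem.Set.ofList (d.keys.filter (fun k => d.getD k false))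
  -- starts = sorted(k for k in s if k - 1 not in s); ends = sorted(k for k in s if k + 1 not in s)
  -- (sorted over a set: the result does not depend on the set's iteration order)
  let starts := PySem.List.sorted (s.filter (fun k => !(PySem.Set.contains s (k - 1)))) (fun x => x) false
  let ends := PySem.List.sorted (s.filter (fun k => !(PySem.Set.contains s (k + 1)))) (fun x => x) false
  String.ofList (PySem.Chars.join [','] ((starts.zip ends).map (fun p => pvFmtB p.1 p.2)))

-- ===== PRECONDITION & SPEC =====
def Spec_get_indices_list_str (data_hash : List (Int × Bool)) (out : String) : Prop := out = get_indices_list_str_alt data_hash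
instance (data_hash : List (Int × Bool)) (out : String) : Decidable (Spec_get_indices_list_str data_hash out) := by unfold Spec_get_indices_list_str; infer_instance

-- ===== CLAIM (what is proved, stated in full; the proofs are below) =====
def Claim_equal_get_indices_list_str : Prop := ∀ (data_hash : List (Int × Bool)), Dom_get_indices_list_str data_hash → Spec_get_indices_list_str data_hash (get_indices_list_str data_hash)

-- ===== LEMMAS AND PROOFS =====

-- proof-side bridge: the (start, end) pairs of the maximal runs of a strictly increasing list
def pvRunPairs (start prev : Int) : List Int → List (Int × Int)
  | [] => [(start, prev)]
  | x :: xs =>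
      if x - prev = 1 then pvRunPairs start x xs
      else (start, prev) :: pvRunPairs x x xs

-- A's formatting of the run [start..prev] is B's formatting of (start, prev).
lemma fmtA_run (start prev : Int) (h : start ≤ prev) :
    pvFmtA (PySem.List.pyRange start (prev + 1) 1) = pvFmtB start prev := by
  have hlen : (PySem.List.pyRange start (prev + 1) 1).length = (prev + 1 - start).toNat :=
    PySem.List.length_pyRange_one start (prev + 1)
  have hhead : PySem.List.pyGetD (PySem.List.pyRange start (prev + 1) 1) 0 0 = start := by
    rw [PySem.List.pyRange_one_cons (by omega), PySem.List.pyGetD_zero_cons]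
  have hsplit : PySem.List.pyRange start (prev + 1) 1
      = PySem.List.pyRange start prev 1 ++ [prev] := PySem.List.pyRange_one_succ_right h
  have hlast : PySem.List.pyGetD (PySem.List.pyRange start (prev + 1) 1) (-1) 0 = prev := by
    rw [hsplit, PySem.List.pyGetD_neg_one_append_singleton]
  unfold pvFmtA pvFmtB
  rw [hhead, hlast, hlen]
  rcases eq_or_lt_of_le h with he | hlt
  · have h1 : (prev + 1 - start).toNat = 1 := by omega
    rw [h1, PySem.List.slice_to_natCast]
    simp [he, PySem.Chars.join_singleton]
  · have h2 : (2:Nat) ≤ (prev + 1 - start).toNat := by omega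
    have hne : ¬ start = prev := by omega
    rw [show ((prev + 1 - start).toNat : Int) = (((prev + 1 - start).toNat : Nat) : Int) from rfl,
        PySem.List.slice_to_natCast]
    simp [List.take_of_length_le, h2, hne, PySem.Chars.join_cons_cons, PySem.Chars.join_singleton]

-- A's loop: the group accumulator is exactly the run [start..prev]
lemma groups_runs (xs : List Int) : ∀ start prev, start ≤ prev →
    (pvGroupsGo prev (PySem.List.pyRange start (prev + 1) 1) xs).map pvFmtA
      = (pvRunPairs start prev xs).map (fun p => pvFmtB p.1 p.2) := by
  induction xs with
  | nil => intro start prev h; simp [pvGroupsGo, pvRunPairs, fmtA_run start prev h]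
  | cons x xs ih =>
      intro start prev h
      by_cases hx : x - prev = 1
      · have hx1 : x = prev + 1 := by omega
        rw [pvGroupsGo, pvRunPairs, if_pos hx, if_pos hx]
        have : PySem.List.pyRange start (prev + 1) 1 ++ [x]
            = PySem.List.pyRange start (x + 1) 1 := by
          rw [hx1, ← PySem.List.pyRange_one_succ_right (by omega)]
        rw [this]
        exact ih start x (by omega)
      · rw [pvGroupsGo, pvRunPairs, if_neg hx, if_neg hx]
        rw [List.map_cons, List.map_cons, fmtA_run start prev h]
        have : [x] = PySem.List.pyRange x (x + 1) 1 := (PySem.List.pyRange_one_singleton x).symm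
        rw [this, ih x x le_rfl]

-- B's core: on a strictly increasing list, zipping the membership-detected starts and
-- ends yields exactly the run pairs.
lemma zip_filters_runPairs (xs : List Int) : ∀ (start prev : Int),
    (prev :: xs).Pairwise (· < ·) →
    List.zip (start :: xs.filter (fun k => !decide ((k - 1) ∈ prev :: xs)))
        ((prev :: xs).filter (fun k => !decide ((k + 1) ∈ prev :: xs)))
      = pvRunPairs start prev xs := by
  induction xs with
  | nil =>
      intro start prev _
      have h1 : ¬ ((prev + 1) ∈ ([prev] : List Int)) := by simp
      simp [pvRunPairs, List.filter, h1]
  | cons y ys ih =>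
      intro start prev hp
      obtain ⟨hfst, hres⟩ := List.pairwise_cons.1 hp
      have hy : prev < y := hfst y (by simp)
      obtain ⟨hyall, _⟩ := List.pairwise_cons.1 hres
      -- tail filters only depend on the local list
      have hstart_tail : ys.filter (fun k => !decide ((k - 1) ∈ prev :: y :: ys))
          = ys.filter (fun k => !decide ((k - 1) ∈ y :: ys)) := by
        apply List.filter_congr
        intro k hk
        have hky : y < k := hyall k hk
        have hne : ¬ (k - 1 = prev) := by omega
        simp [List.mem_cons, hne]
      have hend_tail : (y :: ys).filter (fun k => !decide ((k + 1) ∈ prev :: y :: ys))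
          = (y :: ys).filter (fun k => !decide ((k + 1) ∈ y :: ys)) := by
        apply List.filter_congr
        intro k hk
        have hky : y ≤ k := by
          rcases List.mem_cons.1 hk with h | h
          · omega
          · exact le_of_lt (hyall k h)
        have hne : ¬ (k + 1 = prev) := by omega
        simp [List.mem_cons, hne]
      have hy_mem : ((y - 1) ∈ prev :: y :: ys) ↔ y = prev + 1 := by
        simp only [List.mem_cons]
        constructor
        · rintro (h | h | h)
          · omega
          · omega
          · exact absurd (hyall _ h) (by omega)
        · intro h; left; omega
      have hprev_mem : ((prev + 1) ∈ prev :: y :: ys) ↔ y = prev + 1 := by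
        simp only [List.mem_cons]
        constructor
        · rintro (h | h | h)
          · omega
          · omega
          · exact absurd (hyall _ h) (by omega)
        · intro h; right; left; omega
      by_cases hc : y = prev + 1
      · have hc' : y - prev = 1 := by omega
        have hb1 : decide ((y - 1) ∈ prev :: y :: ys) = true := decide_eq_true (hy_mem.2 hc)
        have hb2 : decide ((prev + 1) ∈ prev :: y :: ys) = true := decide_eq_true (hprev_mem.2 hc)
        rw [pvRunPairs, if_pos hc', List.filter_cons, List.filter_cons, hb1, hb2]
        simp only [Bool.not_true, Bool.false_eq_true, if_false]
        rw [hstart_tail, hend_tail]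
        exact ih start y hres
      · have hc' : ¬ (y - prev = 1) := by omega
        have hb1 : decide ((y - 1) ∈ prev :: y :: ys) = false :=
          decide_eq_false (fun h => hc (hy_mem.1 h))
        have hb2 : decide ((prev + 1) ∈ prev :: y :: ys) = false :=
          decide_eq_false (fun h => hc (hprev_mem.1 h))
        rw [pvRunPairs, if_neg hc', List.filter_cons, List.filter_cons, hb1, hb2]
        simp only [Bool.not_false, if_true]
        rw [hstart_tail, hend_tail, List.zip_cons_cons]
        congr 1
        exact ih y y hres

-- ===== VERDICT (by name: the statement is the Claim_equal_ definition above) =====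
theorem get_indices_list_str_spec : Claim_equal_get_indices_list_str := by
  intro data_hash _
  unfold Spec_get_indices_list_str get_indices_list_str get_indices_list_str_alt
  simp only [PySem.List.foldl_append_if_eq_filter, List.nil_append]
  set d := PySem.Dict.ofList data_hash with hd
  have hK : d.keys.Nodup := by rw [hd]; exact PySem.Dict.nodup_keys_ofList data_hash
  set p : Int → Bool := fun l => d.getD l false with hpdef
  set K := d.keys with hKdef
  set SK := PySem.List.sorted K (fun x => x) false with hSKdef
  set L := SK.filter p with hLdef
  set T := K.filter p with hTdef
  have hTnd : T.Nodup := hK.filter p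
  have hset : PySem.Set.ofList T = T := PySem.Set.ofList_eq_self_of_nodup T hTnd
  have hSKperm : SK.Perm K := PySem.List.sorted_perm K (fun x => x) false
  have hSKnd : SK.Nodup := hSKperm.nodup_iff.2 hK
  have hSKle : SK.Pairwise (· ≤ ·) := PySem.List.sorted_pairwise K (fun x => x)
  have hSKlt : SK.Pairwise (· < ·) :=
    (hSKle.and hSKnd).imp (fun h => lt_of_le_of_ne h.1 h.2)
  have hLlt : L.Pairwise (· < ·) := hSKlt.filter p
  have hLperm : L.Perm T := hSKperm.filter p
  have hmem : ∀ x : Int, x ∈ T ↔ x ∈ L := fun x => (hLperm.mem_iff).symm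
  -- the two set-filters, rewritten to membership in L
  have hcontains : ∀ x : Int, PySem.Set.contains T x = decide (x ∈ L) := by
    intro x
    have h1 : PySem.Set.contains T x = true ↔ x ∈ L :=
      (PySem.Set.contains_iff T x).trans (hmem x)
    by_cases h : x ∈ L
    · rw [h1.2 h, decide_eq_true h]
    · rw [decide_eq_false h]
      exact Bool.eq_false_iff.2 (fun hc => h (h1.1 hc))
  have hfilters : ∀ q : Int → Bool,
      PySem.List.sorted (T.filter q) (fun x => x) false = L.filter q := by
    intro q
    exact PySem.List.sorted_eq_of_perm_of_pairwise_lt (T.filter q) (L.filter q) (fun x => x) (hLperm.filter q) (hLlt.filter q)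
  rw [hset]
  have hstarts : PySem.List.sorted (T.filter (fun k => !(PySem.Set.contains T (k - 1))))
      (fun x => x) false = L.filter (fun k => !decide ((k - 1) ∈ L)) := by
    rw [show (fun k => !(PySem.Set.contains T (k - 1))) = (fun k => !decide ((k - 1) ∈ L))
      from funext fun k => by rw [hcontains]]
    exact hfilters _
  have hends : PySem.List.sorted (T.filter (fun k => !(PySem.Set.contains T (k + 1))))
      (fun x => x) false = L.filter (fun k => !decide ((k + 1) ∈ L)) := by
    rw [show (fun k => !(PySem.Set.contains T (k + 1))) = (fun k => !decide ((k + 1) ∈ L))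
      from funext fun k => by rw [hcontains]]
    exact hfilters _
  rw [hstarts, hends]
  -- now both sides are computed from L; case on L
  cases hL : L with
  | nil => rfl
  | cons x xs =>
      have hLlt' : (x :: xs).Pairwise (· < ·) := hL ▸ hLlt
      obtain ⟨hxall, _⟩ := List.pairwise_cons.1 hLlt'
      -- the head is always kept by the start filter
      have hhead : (x :: xs).filter (fun k => !decide ((k - 1) ∈ x :: xs))
          = x :: xs.filter (fun k => !decide ((k - 1) ∈ x :: xs)) := by
        rw [List.filter_cons]
        have : ¬ ((x - 1) ∈ x :: xs) := by
          simp only [List.mem_cons]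
          rintro (h | h)
          · omega
          · exact absurd (hxall _ h) (by omega)
        simp [this]
      rw [hhead, zip_filters_runPairs xs x x hLlt']
      -- A's side
      show String.ofList (PySem.Chars.join [','] ((pvGroupsGo x [x] xs).map pvFmtA)) = _
      rw [show [x] = PySem.List.pyRange x (x + 1) 1 from (PySem.List.pyRange_one_singleton x).symm,
          groups_runs xs x x le_rfl]
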